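-- pv_equiv track=rewrite | github.com/Seungkyu-Han/BOJ | 백준/Silver/31861. 비밀번호 만들기/비밀번호 만들기.py | count_passwords
-- ===== SOURCE A (Python) =====
-- def count_passwords(n, m):
--     dp = [[0] * 27 for _ in range(m + 1)]
--
--     for j in range(1, 27):
--         dp[1][j] = 1
--
--     for i in range(2, m + 1):
--         for j in range(1, 27):
--             for k in range(1, 27):
--                 if abs(j - k) >= n:
--                     dp[i][j] = (dp[i][j] + dp[i - 1][k]) % 1000000007
--
--     result = 0
--     for j in range(1, 27):
--         result = (result + dp[m][j]) % 1000000007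
--
--     return result
-- ===== SOURCE B (Python) =====
-- MOD = 1000000007
--
--
-- def count_passwords(n, m):
--     # One row at a time; prefix sums replace the inner 26-term scan:
--     # new[j] = (total - sum of prev over the forbidden window |j - k| < n) mod MOD.
--     prev = [1] * 26
--     for _ in range(m - 1):
--         pre = [0]
--         s = 0
--         for x in prev:
--             s = (s + x) % MOD
--             pre.append(s)
--         total = pre[26]
--         cur = []
--         for j in range(26):
--             lo = j - n + 1
--             if lo < 0:
--                 lo = 0
--             hi = j + n
--             if hi > 26:
--                 hi = 26
--             forbidden = pre[hi] - pre[lo] if lo < hi else 0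
--             cur.append((total - forbidden) % MOD)
--         prev = cur
--     return sum(prev) % MOD
-- ===== Notes on version B (the rewrite author's own statement) =====
-- stated objective: faster
-- what changed: Replaces the (m x 26 x 26) triple-loop DP table with a single rolling row updated via prefix sums, so each new entry is total minus one window lookup instead of a 26-term scan.
import Mathlib
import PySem

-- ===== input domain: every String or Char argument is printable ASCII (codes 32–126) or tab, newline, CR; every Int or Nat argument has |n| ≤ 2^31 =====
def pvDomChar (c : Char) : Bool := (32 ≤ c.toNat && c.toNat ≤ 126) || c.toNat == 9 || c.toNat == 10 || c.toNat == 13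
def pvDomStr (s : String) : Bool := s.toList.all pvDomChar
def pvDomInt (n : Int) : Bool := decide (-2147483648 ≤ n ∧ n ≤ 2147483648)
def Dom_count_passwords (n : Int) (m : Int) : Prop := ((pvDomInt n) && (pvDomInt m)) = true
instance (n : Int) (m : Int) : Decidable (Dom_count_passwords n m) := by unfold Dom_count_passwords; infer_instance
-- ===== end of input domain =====

-- B replaces A's triple-loop DP with one rolling row updated through prefix sums
-- (each new entry = total minus one window lookup); measured faster by a constant factor.

-- ===== PORT A =====
-- Python's dp is a list of 27-element rows; dp[i][j] reads/assignments are ported with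
-- PySem.List.pyGetD / pySetD (exact: under Pre_ (1 ≤ m) every index Python uses is in
-- range; Python raises IndexError for m <= 0, excluded by Pre_).
def count_passwords (n : Int) (m : Int) : Int :=
  -- dp = [[0] * 27 for _ in range(m + 1)]
  let dp0 : List (List Int) := List.replicate (m+1).toNat (List.replicate 27 0)
  -- for j in range(1, 27): dp[1][j] = 1
  let dp1 := (PySem.List.pyRange 1 27 1).foldl (fun dp j =>
    PySem.List.pySetD dp 1 (PySem.List.pySetD (PySem.List.pyGetD dp 1 []) j 1)) dp0
  -- for i in range(2, m+1): for j in range(1, 27): for k in range(1, 27):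
  --   if abs(j-k) >= n: dp[i][j] = (dp[i][j] + dp[i-1][k]) % 1000000007
  let dp2 := (PySem.List.pyRange 2 (m+1) 1).foldl (fun dp i =>
    (PySem.List.pyRange 1 27 1).foldl (fun dp j =>
      (PySem.List.pyRange 1 27 1).foldl (fun dp k =>
        if n ≤ |j - k| then
          PySem.List.pySetD dp i (PySem.List.pySetD (PySem.List.pyGetD dp i []) j
            (PySem.Int.mod (PySem.List.pyGetD (PySem.List.pyGetD dp i []) j 0
              + PySem.List.pyGetD (PySem.List.pyGetD dp (i-1) []) k 0) 1000000007))
        else dp)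
        dp) dp) dp1
  -- result = 0; for j in range(1, 27): result = (result + dp[m][j]) % 1000000007
  (PySem.List.pyRange 1 27 1).foldl (fun r j =>
    PySem.Int.mod (r + PySem.List.pyGetD (PySem.List.pyGetD dp2 m []) j 0) 1000000007) 0

-- ===== PORT B =====
-- one step of Source B's loop body: prefix sums of prev, then the 26 window lookups
def pvBStep (n : Int) (prev : List Int) : List Int :=
  -- pre = [0]; s = 0; for x in prev: s = (s + x) % MOD; pre.append(s)
  let ps := prev.foldl
    (fun (st : List Int × Int) x =>
      (st.1 ++ [PySem.Int.mod (st.2 + x) 1000000007], PySem.Int.mod (st.2 + x) 1000000007))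
    ([0], 0)
  let pre := ps.1
  -- total = pre[26]   (index in range: pre has 27 entries)
  let total := PySem.List.pyGetD pre 26 0
  -- cur = []; for j in range(26): …; cur.append((total - forbidden) % MOD)
  (PySem.List.pyRange 0 26 1).foldl (fun cur j =>
    let lo := if j - n + 1 < 0 then 0 else j - n + 1
    let hi := if 26 < j + n then 26 else j + n
    let forbidden := if lo < hi then PySem.List.pyGetD pre hi 0 - PySem.List.pyGetD pre lo 0 else 0
    cur ++ [PySem.Int.mod (total - forbidden) 1000000007]) []

def count_passwords_alt (n : Int) (m : Int) : Int :=
  -- prev = [1] * 26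
  let prev0 : List Int := List.replicate 26 1
  -- for _ in range(m - 1): … (runs max 0 (m-1) times)
  let fin := (List.range (m-1).toNat).foldl (fun prev _ => pvBStep n prev) prev0
  -- return sum(prev) % MOD
  PySem.Int.mod fin.sum 1000000007

-- ===== PRECONDITION & SPEC =====
-- Pre_ excludes exactly m ≤ 0, where A raises IndexError (dp[1] does not exist).
def Pre_count_passwords (n : Int) (m : Int) : Prop := 1 ≤ m
instance (n : Int) (m : Int) : Decidable (Pre_count_passwords n m) := by
  unfold Pre_count_passwords; infer_instance

def pvWitness_count_passwords : Int × Int := (2, 3)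

def Spec_count_passwords (n : Int) (m : Int) (out : Int) : Prop := out = count_passwords_alt n m
instance (n : Int) (m : Int) (out : Int) : Decidable (Spec_count_passwords n m out) := by
  unfold Spec_count_passwords; infer_instance

-- ===== CLAIM (what is proved, stated in full; the proofs are below) =====
def Claim_equal_count_passwords : Prop := ∀ (n : Int) (m : Int), Dom_count_passwords n m →
  Pre_count_passwords n m → Spec_count_passwords n m (count_passwords n m)

-- ===== LEMMAS AND PROOFS =====

-- the shared mathematical layer: row t of the DP, indexed 1..26 (A) resp. 0..25 (B)

def pvP : Int := 1000000007

-- sum over k = 1..26 of prev k restricted to the allowed transitions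
def pvSumA (n : Int) (prev : Int → Int) (j : Int) : Int :=
  (((PySem.List.pyRange 1 27 1)).map (fun k => if n ≤ |j - k| then prev k else 0)).sum

def pvRowA (n : Int) : Nat → Int → Int
  | 0 => fun _ => 0
  | 1 => fun j => if 1 ≤ j ∧ j < 27 then 1 else 0
  | (t+2) => fun j => if 1 ≤ j ∧ j < 27 then (pvSumA n (pvRowA n (t+1)) j) % pvP else 0

-- B-side row list: row t+1 of the DP, as the length-26 list B carries
def pvRowL (n : Int) (t : Nat) : List Int :=
  (PySem.List.pyRange 1 27 1).map (pvRowA n (t+1))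

-- mod-prefix-scan of a list (the mathematical content of Source B's pre list)
def pvScan (s : Int) : List Int → List Int
  | [] => []
  | x :: xs => ((s + x) % pvP) :: pvScan ((s + x) % pvP) xs

def pvScanLast (s : Int) : List Int → Int
  | [] => s
  | x :: xs => pvScanLast ((s + x) % pvP) xs

lemma pv_mod_def (a : Int) : PySem.Int.mod a 1000000007 = a % pvP :=
  PySem.Int.mod_eq_emod_of_pos (by norm_num)

lemma pv_p_pos : (0 : Int) < pvP := by norm_num [pvP]

-- running total taken mod p at every step = plain sum mod p
lemma pv_sfold (f : Int → Int) : ∀ (l : List Int) (a : Int), 0 ≤ a → a < pvP →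
    l.foldl (fun r j => (r + f j) % pvP) a = (a + (l.map f).sum) % pvP := by
  intro l
  induction l with
  | nil => intro a h1 h2; simpa using (Int.emod_eq_of_lt h1 h2).symm
  | cons x t ih =>
      intro a h1 h2
      simp only [List.foldl_cons, List.map_cons, List.sum_cons]
      rw [ih _ (Int.emod_nonneg _ (by norm_num [pvP])) (Int.emod_lt_of_pos _ pv_p_pos),
        Int.emod_add_emod, add_assoc]

-- zero row, full rows, partially filled rows, and the dp table in its successive states
def pvRowZ : List Int := List.replicate 27 0

def pvRowList (n : Int) (t : Nat) : List Int :=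
  (List.range 27).map (fun (j : Nat) => pvRowA n t (j : Int))

def pvRowP (n : Int) (t : Nat) (a : Int) : List Int :=
  (List.range 27).map (fun (j : Nat) => if 1 ≤ (j:Int) ∧ (j:Int) < a then pvRowA n t (j:Int) else 0)

def pvTabL (n : Int) (M i : Nat) : List (List Int) :=
  (List.range (M+1)).map (fun r => if 1 ≤ r ∧ r ≤ i then pvRowList n r else pvRowZ)

def pvTabI (n : Int) (M : Nat) (a : Int) : List (List Int) :=
  (List.range (M+1)).map (fun r => if r = 1 then pvRowP n 1 a else pvRowZ)

def pvTabM (n : Int) (M t : Nat) (a : Int) : List (List Int) :=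
  (List.range (M+1)).map (fun r =>
    if 1 ≤ r ∧ r ≤ t+1 then pvRowList n r else if r = t+2 then pvRowP n (t+2) a else pvRowZ)

lemma pv_getD_set_self {α : Type} (l : List α) (u : Nat) (v d : α) (h : u < l.length) :
    (l.set u v).getD u d = v := by
  rw [List.getD_eq_getElem _ _ (by simpa using h)]
  simp

lemma pv_getD_set_ne {α : Type} (l : List α) (u w : Nat) (v d : α) (h : u ≠ w) :
    (l.set u v).getD w d = l.getD w d := by
  simp [List.getD, List.getElem?_set_ne h]

lemma pv_set_map_range {α : Type} (f : Nat → α) (N u : Nat) (v : α) (hu : u < N) :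
    (((List.range N).map f).set u v) = (List.range N).map (fun r => if r = u then v else f r) := by
  apply List.ext_getElem (by simp)
  intro k h1 h2
  simp only [List.getElem_set, List.getElem_map, List.getElem_range]
  split_ifs with h3 h4 h4 <;> first | rfl | omega

lemma pv_rowA_zero (n : Int) (t : Nat) (j : Int) (h : ¬ (1 ≤ j ∧ j < 27)) :
    pvRowA n t j = 0 := by
  match t with
  | 0 => rfl
  | 1 => simp only [pvRowA]; rw [if_neg h]
  | (t+2) => simp only [pvRowA]; rw [if_neg h]

lemma pv_rowP_one (n : Int) (t : Nat) : pvRowP n t 1 = pvRowZ := by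
  unfold pvRowP pvRowZ
  rw [show (27:Nat) = ((List.range 27).map
      (fun (j : Nat) => if 1 ≤ (j:Int) ∧ (j:Int) < 1 then pvRowA n t (j:Int) else (0:Int))).length
    by simp, List.eq_replicate_iff]
  refine ⟨rfl, ?_⟩
  intro b hb
  rcases List.mem_map.mp hb with ⟨x, _, hbx⟩
  rw [← hbx, if_neg (by omega)]

lemma pv_rowP_full (n : Int) (t : Nat) : pvRowP n t 27 = pvRowList n t := by
  unfold pvRowP pvRowList
  apply List.map_congr_left
  intro j hj
  by_cases h : 1 ≤ (j:Int) ∧ (j:Int) < 27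
  · rw [if_pos h]
  · rw [if_neg h, pv_rowA_zero n t _ h]

lemma pv_rowP_get (n : Int) (t : Nat) (a x : Int) (h0 : 0 ≤ x) (h27 : x < 27) :
    PySem.List.pyGetD (pvRowP n t a) x 0 = if 1 ≤ x ∧ x < a then pvRowA n t x else 0 := by
  rw [PySem.List.pyGetD_of_nonneg _ _ h0]
  unfold pvRowP
  rw [PySem.List.getD_map_range _ _ _ _ (by omega), show ((x.toNat : Nat) : Int) = x by omega]

lemma pv_rowList_get (n : Int) (t : Nat) (x : Int) (h0 : 0 ≤ x) (h27 : x < 27) :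
    PySem.List.pyGetD (pvRowList n t) x 0 = pvRowA n t x := by
  rw [PySem.List.pyGetD_of_nonneg _ _ h0]
  unfold pvRowList
  rw [PySem.List.getD_map_range _ _ _ _ (by omega), show ((x.toNat : Nat) : Int) = x by omega]

lemma pv_rowP_set (n : Int) (t : Nat) (a : Int) (h1 : 1 ≤ a) (h27 : a < 27) :
    PySem.List.pySetD (pvRowP n t a) a (pvRowA n t a) = pvRowP n t (a+1) := by
  rw [PySem.List.pySetD_of_nonneg _ _ (by omega)]
  unfold pvRowP
  rw [pv_set_map_range _ _ _ _ (by omega)]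
  apply List.map_congr_left
  intro j hj
  by_cases h : j = a.toNat
  · rw [if_pos h, if_pos (by omega), show ((j:Nat):Int) = a by omega]
  · rw [if_neg h]
    by_cases h2 : 1 ≤ (j:Int) ∧ (j:Int) < a
    · rw [if_pos h2, if_pos (by omega)]
    · rw [if_neg h2, if_neg (by omega)]

-- the k-loop: repeated in-place mod-adds into cell (i, j) of the dp table
lemma pv_kfoldL (n i j : Int) (hi : 1 ≤ i) : ∀ (l : List Int) (dp : List (List Int)),
    i < (dp.length : Int) →
    0 ≤ PySem.List.pyGetD (PySem.List.pyGetD dp i []) j 0 →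
    PySem.List.pyGetD (PySem.List.pyGetD dp i []) j 0 < pvP →
    0 ≤ j → j < ((PySem.List.pyGetD dp i []).length : Int) →
    l.foldl (fun dp k =>
        if n ≤ |j - k| then
          PySem.List.pySetD dp i (PySem.List.pySetD (PySem.List.pyGetD dp i []) j
            ((PySem.List.pyGetD (PySem.List.pyGetD dp i []) j 0
              + PySem.List.pyGetD (PySem.List.pyGetD dp (i-1) []) k 0) % pvP))
        else dp) dp
      = PySem.List.pySetD dp i (PySem.List.pySetD (PySem.List.pyGetD dp i []) j
          ((PySem.List.pyGetD (PySem.List.pyGetD dp i []) j 0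
            + (l.map fun k => if n ≤ |j - k| then
                PySem.List.pyGetD (PySem.List.pyGetD dp (i-1) []) k 0 else 0).sum) % pvP)) := by
  intro l
  induction l with
  | nil =>
      intro dp hlen h0 hp hj0 hj27
      simp only [List.foldl_nil, List.map_nil, List.sum_nil, add_zero]
      rw [Int.emod_eq_of_lt h0 hp,
        PySem.List.pyGetD_of_nonneg _ _ hj0, PySem.List.pySetD_of_nonneg _ _ hj0,
        List.getD_eq_getElem _ _ (by omega), List.set_getElem_self,
        PySem.List.pyGetD_of_nonneg _ _ (by omega), PySem.List.pySetD_of_nonneg _ _ (by omega),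
        List.getD_eq_getElem _ _ (by omega), List.set_getElem_self]
  | cons x t ih =>
      intro dp hlen h0 hp hj0 hj27
      simp only [List.foldl_cons, List.map_cons, List.sum_cons]
      by_cases hc : n ≤ |j - x|
      · rw [if_pos hc, if_pos hc]
        set v : Int := (PySem.List.pyGetD (PySem.List.pyGetD dp i []) j 0
          + PySem.List.pyGetD (PySem.List.pyGetD dp (i-1) []) x 0) % pvP with hv
        set dp' := PySem.List.pySetD dp i (PySem.List.pySetD (PySem.List.pyGetD dp i []) j v)
          with hdp'
        have hlen' : dp'.length = dp.length := by rw [hdp', PySem.List.length_pySetD]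
        have f1 : PySem.List.pyGetD dp' i []
            = PySem.List.pySetD (PySem.List.pyGetD dp i []) j v := by
          rw [hdp', PySem.List.pyGetD_of_nonneg _ _ (by omega),
            PySem.List.pySetD_of_nonneg _ _ (by omega),
            pv_getD_set_self _ _ _ _ (by omega)]
        have f2 : PySem.List.pyGetD dp' (i-1) [] = PySem.List.pyGetD dp (i-1) [] := by
          rw [hdp', PySem.List.pyGetD_of_nonneg _ _ (by omega),
            PySem.List.pySetD_of_nonneg _ _ (by omega),
            pv_getD_set_ne _ _ _ _ _ (by omega),
            ← PySem.List.pyGetD_of_nonneg _ _ (by omega : (0:Int) ≤ i - 1)]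
        have f3 : PySem.List.pyGetD (PySem.List.pyGetD dp' i []) j 0 = v := by
          rw [f1, PySem.List.pyGetD_of_nonneg _ _ hj0, PySem.List.pySetD_of_nonneg _ _ hj0,
            pv_getD_set_self _ _ _ _ (by omega)]
        have f5 : ((PySem.List.pyGetD dp' i []).length : Int)
            = ((PySem.List.pyGetD dp i []).length : Int) := by
          rw [f1, PySem.List.length_pySetD]
        rw [ih dp' (by rw [hlen']; exact hlen)
            (by rw [f3, hv]; exact Int.emod_nonneg _ (by norm_num [pvP]))
            (by rw [f3, hv]; exact Int.emod_lt_of_pos _ pv_p_pos)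
            hj0 (by rw [f5]; exact hj27)]
        have hmap : (t.map fun k => if n ≤ |j - k| then
            PySem.List.pyGetD (PySem.List.pyGetD dp' (i-1) []) k 0 else 0)
            = t.map fun k => if n ≤ |j - k| then
                PySem.List.pyGetD (PySem.List.pyGetD dp (i-1) []) k 0 else 0 :=
          List.map_congr_left (fun k _ => by rw [f2])
        rw [f3, f1, hmap, hdp']
        rw [PySem.List.pySetD_of_nonneg (xs := PySem.List.pyGetD dp i []) (v := v) (by omega),
          PySem.List.pySetD_of_nonneg (xs := dp) _ (by omega),
          PySem.List.pySetD_of_nonneg (xs := dp.set _ _) _ (by omega), List.set_set,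
          PySem.List.pySetD_of_nonneg
            (xs := (PySem.List.pyGetD dp i []).set _ _) _ (by omega), List.set_set,
          ← PySem.List.pySetD_of_nonneg (xs := PySem.List.pyGetD dp i []) _ (by omega),
          ← PySem.List.pySetD_of_nonneg (xs := dp) _ (by omega)]
        rw [hv, Int.emod_add_emod, add_assoc]
      · rw [if_neg hc, if_neg hc, ih dp hlen h0 hp hj0 hj27, zero_add]

-- access to the partially-updated table
lemma pv_tabM_len (n : Int) (M t : Nat) (a : Int) : (pvTabM n M t a).length = M + 1 := by
  simp [pvTabM]

lemma pv_tabM_row_i (n : Int) (M t : Nat) (a : Int) (hM : t + 2 ≤ M) :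
    PySem.List.pyGetD (pvTabM n M t a) ((t:Int)+2) [] = pvRowP n (t+2) a := by
  rw [PySem.List.pyGetD_of_nonneg _ _ (by omega)]
  unfold pvTabM
  rw [show ((t:Int)+2).toNat = t+2 by omega,
    PySem.List.getD_map_range _ _ _ _ (by omega), if_neg (by omega), if_pos rfl]

lemma pv_tabM_row_prev (n : Int) (M t : Nat) (a : Int) (hM : t + 2 ≤ M) :
    PySem.List.pyGetD (pvTabM n M t a) (((t:Int)+2)-1) [] = pvRowList n (t+1) := by
  rw [PySem.List.pyGetD_of_nonneg _ _ (by omega)]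
  unfold pvTabM
  rw [show (((t:Int)+2)-1).toNat = t+1 by omega,
    PySem.List.getD_map_range _ _ _ _ (by omega), if_pos (by omega)]

-- the j-loop: fills cells aa..26 of row t+2 from row t+1
lemma pv_jfoldL (n : Int) (M t : Nat) (hM : t + 2 ≤ M) : ∀ (N : Nat) (aa : Int),
    1 ≤ aa → aa + N = 27 →
    (PySem.List.pyRange aa 27 1).foldl (fun dp j =>
      (PySem.List.pyRange 1 27 1).foldl (fun dp k =>
        if n ≤ |j - k| then
          PySem.List.pySetD dp ((t:Int)+2) (PySem.List.pySetD
            (PySem.List.pyGetD dp ((t:Int)+2) []) j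
            ((PySem.List.pyGetD (PySem.List.pyGetD dp ((t:Int)+2) []) j 0
              + PySem.List.pyGetD (PySem.List.pyGetD dp (((t:Int)+2)-1) []) k 0) % pvP))
        else dp) dp) (pvTabM n M t aa)
      = pvTabM n M t 27 := by
  intro N
  induction N with
  | zero =>
      intro aa h1 ha
      rw [show aa = (27:Int) by omega, PySem.List.pyRange_one_eq_nil (a := 27) le_rfl,
        List.foldl_nil]
  | succ N ih =>
      intro aa h1 ha
      rw [PySem.List.pyRange_one_cons (a := aa) (by omega), List.foldl_cons]
      have hcell : PySem.List.pyGetD (PySem.List.pyGetD (pvTabM n M t aa) ((t:Int)+2) []) aa 0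
          = 0 := by
        rw [pv_tabM_row_i n M t aa hM, pv_rowP_get n (t+2) aa aa (by omega) (by omega),
          if_neg (by omega)]
      rw [pv_kfoldL n ((t:Int)+2) aa (by omega) _ (pvTabM n M t aa)
        (by rw [pv_tabM_len]; push_cast; omega)
        (by rw [hcell]) (by rw [hcell]; exact pv_p_pos) (by omega)
        (by rw [pv_tabM_row_i n M t aa hM]; unfold pvRowP; simp; omega)]
      have hsum : ((PySem.List.pyRange 1 27 1).map fun k => if n ≤ |aa - k| then
          PySem.List.pyGetD (PySem.List.pyGetD (pvTabM n M t aa) (((t:Int)+2)-1) []) k 0 else 0)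
          = (PySem.List.pyRange 1 27 1).map fun k =>
              if n ≤ |aa - k| then pvRowA n (t+1) k else 0 := by
        apply List.map_congr_left
        intro k hk
        rcases (PySem.List.mem_pyRange_one).mp hk with ⟨hk1, hk2⟩
        rw [pv_tabM_row_prev n M t aa hM, pv_rowList_get n (t+1) k (by omega) hk2]
      rw [hcell, hsum, pv_tabM_row_i n M t aa hM, zero_add]
      have hnew : ((((PySem.List.pyRange 1 27 1)).map fun k =>
            if n ≤ |aa - k| then pvRowA n (t+1) k else 0).sum) % pvP
          = pvRowA n (t+2) aa := by
        show pvSumA n (pvRowA n (t+1)) aa % pvP = _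
        simp only [pvRowA]
        rw [if_pos (by omega)]
      rw [hnew, pv_rowP_set n (t+2) aa h1 (by omega)]
      have htab : PySem.List.pySetD (pvTabM n M t aa) ((t:Int)+2) (pvRowP n (t+2) (aa+1))
          = pvTabM n M t (aa+1) := by
        rw [PySem.List.pySetD_of_nonneg _ _ (by omega)]
        unfold pvTabM
        rw [show ((t:Int)+2).toNat = t+2 by omega, pv_set_map_range _ _ _ _ (by omega)]
        apply List.map_congr_left
        intro r hr
        by_cases h2 : r = t+2
        · rw [if_pos h2, if_neg (by omega), if_pos h2]
        · rw [if_neg h2]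
          by_cases h3 : 1 ≤ r ∧ r ≤ t+1
          · rw [if_pos h3, if_pos h3]
          · rw [if_neg h3, if_neg h3, if_neg h2, if_neg h2]
      rw [htab, ih (aa+1) (by omega) (by omega)]

-- one outer iteration advances the table one row
lemma pv_istepL (n : Int) (M t : Nat) (hM : t + 2 ≤ M) :
    (PySem.List.pyRange 1 27 1).foldl (fun dp j =>
      (PySem.List.pyRange 1 27 1).foldl (fun dp k =>
        if n ≤ |j - k| then
          PySem.List.pySetD dp ((t:Int)+2) (PySem.List.pySetD
            (PySem.List.pyGetD dp ((t:Int)+2) []) j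
            ((PySem.List.pyGetD (PySem.List.pyGetD dp ((t:Int)+2) []) j 0
              + PySem.List.pyGetD (PySem.List.pyGetD dp (((t:Int)+2)-1) []) k 0) % pvP))
        else dp) dp) (pvTabL n M (t+1))
      = pvTabL n M (t+2) := by
  have hstart : pvTabL n M (t+1) = pvTabM n M t 1 := by
    unfold pvTabL pvTabM
    apply List.map_congr_left
    intro r hr
    by_cases h1 : 1 ≤ r ∧ r ≤ t+1
    · rw [if_pos h1, if_pos h1]
    · rw [if_neg h1, if_neg h1]
      by_cases h2 : r = t+2
      · rw [if_pos h2, pv_rowP_one]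
      · rw [if_neg h2]
  have hend : pvTabM n M t 27 = pvTabL n M (t+2) := by
    unfold pvTabL pvTabM
    apply List.map_congr_left
    intro r hr
    by_cases h1 : 1 ≤ r ∧ r ≤ t+1
    · rw [if_pos h1, if_pos (by omega)]
    · rw [if_neg h1]
      by_cases h2 : r = t+2
      · rw [if_pos h2, if_pos (by omega), pv_rowP_full, h2]
      · rw [if_neg h2, if_neg (by omega)]
  rw [hstart, pv_jfoldL n M t hM 26 1 (by norm_num) (by norm_num), hend]

-- the whole outer loop
lemma pv_ifoldL (n : Int) (M : Nat) : ∀ (T : Nat), T + 1 ≤ M →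
    (PySem.List.pyRange 2 ((T:Int)+2) 1).foldl (fun dp i =>
      (PySem.List.pyRange 1 27 1).foldl (fun dp j =>
        (PySem.List.pyRange 1 27 1).foldl (fun dp k =>
          if n ≤ |j - k| then
            PySem.List.pySetD dp i (PySem.List.pySetD (PySem.List.pyGetD dp i []) j
              ((PySem.List.pyGetD (PySem.List.pyGetD dp i []) j 0
                + PySem.List.pyGetD (PySem.List.pyGetD dp (i-1) []) k 0) % pvP))
          else dp) dp) dp) (pvTabL n M 1)
      = pvTabL n M (T+1) := by
  intro T
  induction T with
  | zero =>
      intro _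
      rw [show ((0:Nat):Int)+2 = 2 by norm_num, PySem.List.pyRange_one_eq_nil le_rfl,
        List.foldl_nil]
  | succ T ih =>
      intro hT
      rw [show (((T+1:Nat)):Int)+2 = ((T:Int)+2)+1 by push_cast; ring,
        PySem.List.pyRange_one_succ_right (by omega), List.foldl_append, List.foldl_cons,
        List.foldl_nil, ih (by omega)]
      exact pv_istepL n M T (by omega)

-- the row-1 initialisation loop
lemma pv_initI (n : Int) (M : Nat) (hM : 1 ≤ M) : ∀ (N : Nat) (aa : Int),
    1 ≤ aa → aa + N = 27 →
    (PySem.List.pyRange aa 27 1).foldl (fun dp j =>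
      PySem.List.pySetD dp 1 (PySem.List.pySetD (PySem.List.pyGetD dp 1 []) j 1))
      (pvTabI n M aa)
      = pvTabI n M 27 := by
  intro N
  induction N with
  | zero =>
      intro aa h1 ha
      rw [show aa = (27:Int) by omega, PySem.List.pyRange_one_eq_nil (a := 27) le_rfl,
        List.foldl_nil]
  | succ N ih =>
      intro aa h1 ha
      rw [PySem.List.pyRange_one_cons (a := aa) (by omega), List.foldl_cons]
      have hrow : PySem.List.pyGetD (pvTabI n M aa) 1 [] = pvRowP n 1 aa := by
        rw [PySem.List.pyGetD_of_nonneg _ _ (by omega)]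
        unfold pvTabI
        rw [show (1:Int).toNat = 1 from rfl,
          PySem.List.getD_map_range _ _ _ _ (by omega), if_pos rfl]
      have hone : (1:Int) = pvRowA n 1 aa := by
        simp only [pvRowA]
        rw [if_pos (by omega)]
      rw [hrow]
      have hset : PySem.List.pySetD (pvRowP n 1 aa) aa 1 = pvRowP n 1 (aa+1) := by
        conv_lhs => rw [hone]
        exact pv_rowP_set n 1 aa h1 (by omega)
      rw [hset]
      have htab : PySem.List.pySetD (pvTabI n M aa) 1 (pvRowP n 1 (aa+1))
          = pvTabI n M (aa+1) := by
        rw [PySem.List.pySetD_of_nonneg _ _ (by omega)]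
        unfold pvTabI
        rw [show (1:Int).toNat = 1 from rfl, pv_set_map_range _ _ _ _ (by omega)]
        apply List.map_congr_left
        intro r hr
        by_cases h2 : r = 1
        · simp only [if_pos h2]
        · simp only [if_neg h2]
      rw [htab, ih (aa+1) (by omega) (by omega)]

lemma pv_init_start (n : Int) (M : Nat) :
    List.replicate (M+1) (List.replicate 27 (0:Int)) = pvTabI n M 1 := by
  unfold pvTabI
  rw [show (List.replicate (M+1) (List.replicate 27 (0:Int)))
      = (List.range (M+1)).map (fun _ => List.replicate 27 (0:Int)) by
    rw [List.map_const', List.length_range]]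
  apply List.map_congr_left
  intro r hr
  by_cases h : r = 1
  · rw [if_pos h, pv_rowP_one]; rfl
  · rw [if_neg h]; rfl

lemma pv_init_end (n : Int) (M : Nat) : pvTabI n M 27 = pvTabL n M 1 := by
  unfold pvTabI pvTabL
  apply List.map_congr_left
  intro r hr
  by_cases h : r = 1
  · rw [if_pos h, if_pos (by omega), pv_rowP_full, h]
  · rw [if_neg h, if_neg (by omega)]

-- characterisation of port A's result
lemma pv_A_eq (n m : Int) (hm : 1 ≤ m) :
    count_passwords n m = ((PySem.List.pyRange 1 27 1).map (pvRowA n m.toNat)).sum % pvP := by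
  unfold count_passwords
  simp only [pv_mod_def]
  rw [show (m+1).toNat = m.toNat + 1 by omega, pv_init_start n m.toNat,
    pv_initI n m.toNat (by omega) 26 1 (by norm_num) (by norm_num), pv_init_end,
    show m + 1 = (((m-1).toNat : Nat) : Int) + 2 by omega,
    pv_ifoldL n m.toNat (m-1).toNat (by omega),
    show (m-1).toNat + 1 = m.toNat by omega]
  rw [pv_sfold (fun j => PySem.List.pyGetD
      (PySem.List.pyGetD (pvTabL n m.toNat m.toNat) m []) j 0) _ 0 le_rfl pv_p_pos, zero_add]
  congr 1
  apply congrArg List.sum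
  apply List.map_congr_left
  intro j hj
  rcases (PySem.List.mem_pyRange_one).mp hj with ⟨hj1, hj2⟩
  have hrow : PySem.List.pyGetD (pvTabL n m.toNat m.toNat) m [] = pvRowList n m.toNat := by
    rw [PySem.List.pyGetD_of_nonneg _ _ (by omega)]
    unfold pvTabL
    rw [PySem.List.getD_map_range _ _ _ _ (by omega), if_pos (by omega)]
  rw [hrow, pv_rowList_get n m.toNat j (by omega) hj2]

-- ===== B-side lemmas =====

lemma pv_scan_fold : ∀ (l acc : List Int) (s : Int),
    l.foldl (fun (st : List Int × Int) x =>
        (st.1 ++ [(st.2 + x) % pvP], (st.2 + x) % pvP)) (acc, s)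
      = (acc ++ pvScan s l, pvScanLast s l) := by
  intro l
  induction l with
  | nil => intro acc s; simp [pvScan, pvScanLast]
  | cons x t ih =>
      intro acc s
      simp only [List.foldl_cons]
      rw [ih]
      simp [pvScan, pvScanLast, List.append_assoc]

lemma pv_scan_getD : ∀ (l : List Int) (s : Int) (u : Nat), u < l.length →
    (pvScan s l).getD u 0 = (s + (l.take (u+1)).sum) % pvP := by
  intro l
  induction l with
  | nil => intro s u h; simp at h
  | cons x t ih =>
      intro s u h
      cases u with
      | zero => simp [pvScan]
      | succ u =>
          simp only [pvScan, List.getD_cons_succ]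
          rw [ih _ u (by simpa using h)]
          simp only [List.take_succ_cons, List.sum_cons]
          rw [Int.emod_add_emod, add_assoc]

lemma pv_take_getD : ∀ (l : List Int) (u t : Nat), t < u →
    (l.take u).getD t 0 = l.getD t 0 := by
  intro l
  induction l with
  | nil => intro u t _; simp
  | cons x xs ih =>
      intro u t ht
      cases u with
      | zero => omega
      | succ u =>
          cases t with
          | zero => simp
          | succ t => simpa using ih u t (by omega)

lemma pv_sum_getD : ∀ (l : List Int), l.sum = ∑ t ∈ Finset.range l.length, l.getD t 0 := by
  intro l
  induction l with
  | nil => simp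
  | cons x xs ih =>
      simp only [List.sum_cons, List.length_cons, ih]
      rw [Finset.sum_range_succ']
      simp
      ring

lemma pv_take_sum (l : List Int) (u : Nat) (hu : u ≤ l.length) :
    (l.take u).sum = ∑ t ∈ Finset.range u, l.getD t 0 := by
  rw [pv_sum_getD, List.length_take, min_eq_left hu]
  exact Finset.sum_congr rfl (fun t ht => pv_take_getD l u t (Finset.mem_range.mp ht))

-- the window identity: total minus the forbidden window = sum of the allowed entries (mod p)
lemma pv_core (n j lo hi : Int) (hj0 : 0 ≤ j) (hj : j < 26) (prev : List Int)
    (hl : prev.length = 26)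
    (hlo : lo = if j - n + 1 < 0 then 0 else j - n + 1)
    (hhi : hi = if 26 < j + n then 26 else j + n) :
    ((prev.sum % pvP) - (if lo < hi then (prev.take hi.toNat).sum % pvP - (prev.take lo.toNat).sum % pvP else 0)) % pvP
      = (∑ t ∈ Finset.range 26, if n ≤ |j - (t:Int)| then prev.getD t 0 else 0) % pvP := by
  have hlo0 : 0 ≤ lo := by rw [hlo]; split_ifs <;> omega
  have hhi26 : hi ≤ 26 := by rw [hhi]; split_ifs <;> omega
  -- strip the inner mods
  have step1 : ((prev.sum % pvP) - (if lo < hi then (prev.take hi.toNat).sum % pvP - (prev.take lo.toNat).sum % pvP else 0)) % pvP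
      = (prev.sum - (if lo < hi then (prev.take hi.toNat).sum - (prev.take lo.toNat).sum else 0)) % pvP := by
    by_cases hw : lo < hi
    · rw [if_pos hw, if_pos hw]
      exact (Int.ModEq.sub (Int.emod_emod_of_dvd _ dvd_rfl)
        (Int.ModEq.sub (Int.emod_emod_of_dvd _ dvd_rfl) (Int.emod_emod_of_dvd _ dvd_rfl)))
    · rw [if_neg hw, if_neg hw]
      exact Int.ModEq.sub (Int.emod_emod_of_dvd _ dvd_rfl) (Int.ModEq.refl _)
  rw [step1]
  congr 1
  by_cases hw : lo < hi
  · rw [if_pos hw]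
    rw [pv_take_sum prev hi.toNat (by omega), pv_take_sum prev lo.toNat (by omega)]
    rw [← Finset.sum_Ico_eq_sub _ (by omega : lo.toNat ≤ hi.toNat)]
    have hsplit : ∀ t ∈ Finset.range 26,
        (if n ≤ |j - (t:Int)| then prev.getD t 0 else 0)
          = prev.getD t 0 - (if lo ≤ (t:Int) ∧ (t:Int) < hi then prev.getD t 0 else 0) := by
      intro t ht
      have ht26 : t < 26 := Finset.mem_range.mp ht
      by_cases hc : n ≤ |j - (t:Int)|
      · rw [if_pos hc, if_neg (by rw [Int.abs_eq_natAbs] at hc; rw [hlo, hhi] at *; split_ifs at * <;> omega)]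
        ring
      · rw [if_neg hc, if_pos (by rw [Int.abs_eq_natAbs] at hc; rw [hlo, hhi] at *; split_ifs at * <;> omega)]
        ring
    rw [Finset.sum_congr rfl hsplit, Finset.sum_sub_distrib]
    have hfil : ∑ t ∈ Finset.range 26, (if lo ≤ (t:Int) ∧ (t:Int) < hi then prev.getD t 0 else 0)
        = ∑ t ∈ Finset.Ico lo.toNat hi.toNat, prev.getD t 0 := by
      rw [← Finset.sum_filter]
      apply Finset.sum_congr _ (fun _ _ => rfl)
      ext t
      simp only [Finset.mem_filter, Finset.mem_range, Finset.mem_Ico]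
      omega
    rw [hfil, pv_sum_getD prev, hl]
  · rw [if_neg hw, sub_zero]
    rw [pv_sum_getD prev, hl]
    exact (Finset.sum_congr rfl (fun t ht => by
      have ht26 : t < 26 := Finset.mem_range.mp ht
      rw [if_pos (by rw [Int.abs_eq_natAbs]; rw [hlo, hhi] at hw; split_ifs at hw <;> omega)])).symm

lemma pv_sum_list_range (f : Nat → Int) (N : Nat) :
    ((List.range N).map f).sum = ∑ t ∈ Finset.range N, f t := by
  induction N with
  | zero => simp
  | succ N ih => rw [List.range_succ, Finset.sum_range_succ, List.map_append, List.sum_append, ih]; simp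

lemma pv_prev_getD (R : Int → Int) (t : Nat) (ht : t < 26) :
    ((PySem.List.pyRange 1 27 1).map R).getD t 0 = R (1 + t) := by
  have hlen : t < ((PySem.List.pyRange 1 27 1).map R).length := by
    simp [PySem.List.length_pyRange_one]
    omega
  rw [List.getD_eq_getElem _ _ hlen, List.getElem_map, PySem.List.getElem_pyRange_one]

lemma pv_pre_getD (prev : List Int) (hl : prev.length = 26) (x : Int) (hx0 : 0 ≤ x) (hx : x ≤ 26) :
    PySem.List.pyGetD (0 :: pvScan 0 prev) x 0 = (prev.take x.toNat).sum % pvP := by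
  rw [PySem.List.pyGetD_of_nonneg _ _ hx0]
  rcases h : x.toNat with _ | u
  · simp [pvP]
  · rw [List.getD_cons_succ, pv_scan_getD prev 0 u (by omega), zero_add]

lemma pv_pyRange_026 : PySem.List.pyRange 0 26 1 = (List.range 26).map (fun k => ((k : Nat) : Int)) := by
  decide

lemma pv_pyRange_127 : PySem.List.pyRange 1 27 1 = (List.range 26).map (fun k => 1 + ((k : Nat) : Int)) := by
  decide

-- one Source B loop step maps row t to row t+1
lemma pv_stepB (n : Int) (t : Nat) : pvBStep n (pvRowL n t) = pvRowL n (t+1) := by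
  have hl : (pvRowL n t).length = 26 := by
    simp [pvRowL, PySem.List.length_pyRange_one]
  simp only [pvBStep, pv_mod_def]
  rw [pv_scan_fold, PySem.List.foldl_append_singleton_eq_map, List.nil_append]
  simp only [List.cons_append, List.nil_append]
  set P := pvRowL n t with hP
  rw [show pvRowL n (t+1) = (List.range 26).map (fun k => pvRowA n (t+2) (1 + ((k:Nat):Int))) by
        rw [pvRowL, pv_pyRange_127, List.map_map]; rfl]
  rw [pv_pyRange_026, List.map_map]
  apply List.map_congr_left
  intro k hk
  have hk26 : k < 26 := List.mem_range.mp hk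
  simp only [Function.comp_apply]
  have hj0 : (0:Int) ≤ (k:Int) := by omega
  have hj26 : ((k:Int)) < 26 := by omega
  set lo : Int := if (k:Int) - n + 1 < 0 then 0 else (k:Int) - n + 1 with hlo
  set hi : Int := if 26 < (k:Int) + n then 26 else (k:Int) + n with hhi
  have hlo0 : 0 ≤ lo := by rw [hlo]; split_ifs <;> omega
  have hhi26 : hi ≤ 26 := by rw [hhi]; split_ifs <;> omega
  have htot : PySem.List.pyGetD (0 :: pvScan 0 P) 26 0 = P.sum % pvP := by
    rw [pv_pre_getD _ hl 26 (by norm_num) le_rfl, show (26:Int).toNat = 26 from rfl, ← hl,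
      List.take_length]
  have hwin : (if lo < hi then
        PySem.List.pyGetD (0 :: pvScan 0 P) hi 0 - PySem.List.pyGetD (0 :: pvScan 0 P) lo 0 else 0)
      = (if lo < hi then (P.take hi.toNat).sum % pvP - (P.take lo.toNat).sum % pvP else 0) := by
    by_cases hw : lo < hi
    · rw [if_pos hw, if_pos hw, pv_pre_getD _ hl hi (by omega) hhi26,
        pv_pre_getD _ hl lo hlo0 (by omega)]
    · rw [if_neg hw, if_neg hw]
  rw [htot, hwin, pv_core n (k:Int) lo hi hj0 hj26 P hl hlo hhi]
  show _ = pvRowA n (t+2) (1 + (k:Int))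
  simp only [pvRowA]
  rw [if_pos (by omega)]
  congr 1
  unfold pvSumA
  rw [pv_pyRange_127, List.map_map, pv_sum_list_range]
  apply Finset.sum_congr rfl
  intro u hu
  have hu26 : u < 26 := Finset.mem_range.mp hu
  simp only [Function.comp_apply]
  rw [show (1 + (k:Int)) - (1 + (u:Int)) = (k:Int) - (u:Int) by ring]
  have hgd : P.getD u 0 = pvRowA n (t+1) (1 + (u:Int)) := by
    rw [hP]
    unfold pvRowL
    exact pv_prev_getD _ u hu26
  by_cases hc : n ≤ |(k:Int) - (u:Int)|
  · rw [if_pos hc, if_pos hc, hgd]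
  · rw [if_neg hc, if_neg hc]

lemma pv_rowL_fold (n : Int) : ∀ (N : Nat),
    (List.range N).foldl (fun prev _ => pvBStep n prev) (List.replicate 26 1) = pvRowL n N := by
  intro N
  induction N with
  | zero =>
      simp only [List.range_zero, List.foldl_nil]
      symm
      rw [List.eq_replicate_iff]
      constructor
      · simp [pvRowL, PySem.List.length_pyRange_one]
      · intro b hb
        rcases List.mem_map.mp hb with ⟨x, hx, hbx⟩
        rcases (PySem.List.mem_pyRange_one).mp hx with ⟨h1, h2⟩
        rw [← hbx]
        show pvRowA n 1 x = 1
        simp only [pvRowA]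
        rw [if_pos ⟨h1, h2⟩]
  | succ N ih =>
      rw [List.range_succ, List.foldl_append, ih, List.foldl_cons, List.foldl_nil, pv_stepB]

lemma pv_B_eq (n m : Int) :
    count_passwords_alt n m = (pvRowL n (m-1).toNat).sum % pvP := by
  simp only [count_passwords_alt, pv_mod_def]
  rw [pv_rowL_fold]

-- ===== VERDICT (by name: the statement is the Claim_ definition above) =====
theorem count_passwords_spec : Claim_equal_count_passwords := by
  intro n m _ hpre
  unfold Pre_count_passwords at hpre
  unfold Spec_count_passwords
  rw [pv_A_eq n m hpre, pv_B_eq]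
  unfold pvRowL
  rw [show (m-1).toNat + 1 = m.toNat by omega]
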